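-- pv_equiv track=rewrite | github.com/sitronsea/GENet | gauge_net/src/utils.py | get_flux_series_indices
-- ===== SOURCE A (Python) =====
-- def get_tuple_index(a, b, n=4):
--     """
--     Get the channel index for (a,b) in the flux tensor
--     """
--     assert a != b
--     minid = min(a, b)
--     maxid = max(a, b)
--
--     return (2 * n - minid - 1) * (minid) // 2 + maxid - minid - 1
--
-- def get_flux_series_indices(n_dims):
--     def get_ordered_perms(series):
--         """
--         Get permutations mu_1, nu_1, ..., mu_n, nu_n such that mu_i < nu_i
--         """
--         series = list(series)
--         assert len(series) % 2 == 0
--         if len(series) == 2: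
--             return [[min(series), max(series)]]
--
--         perms = []
--         for i in range(len(series) - 1):
--             for j in range(i + 1, len(series)):
--                 current = [
--                     min(series[i], series[j]),
--                     max(series[i], series[j])
--                 ]
--                 remaining = series[:i] + series[i + 1:j] + series[j + 1:]
--                 for perm in get_ordered_perms(remaining):
--                     perms.append(current + perm)
--
--         return perms
--
--     def get_perm_index(perm):
--         assert len(perm) % 2 == 0
--         indices = []
--         for i in range(len(perm) // 2):
--             indices.append(
--                 get_tuple_index(perm[2 * i], perm[2 * i + 1], n_dims)
--             )
--         return indices
--
--     perms = get_ordered_perms(range(n_dims))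
--     series_indices = []
--     for perm in perms:
--         series_indices.append(get_perm_index(perm))
--
--     return series_indices
-- ===== SOURCE B (Python) =====
-- def _pair_index(a, b, n):
--     # channel index of the ordered pair (a, b) with a < b in the flux tensor
--     return (2 * n - a - 1) * a // 2 + b - a - 1
--
--
-- def get_flux_series_indices(n_dims):
--     if n_dims <= 0:
--         return []
--     # breadth-first expansion of partial pairings: each state is
--     # (flux indices chosen so far, remaining unpaired dimensions in ascending order)
--     states = [([], list(range(n_dims)))]
--     for _ in range(n_dims // 2):
--         new_states = []
--         for indices, remaining in states:
--             for k, a in enumerate(remaining):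
--                 for b in remaining[k + 1:]:
--                     new_states.append((
--                         indices + [_pair_index(a, b, n_dims)],
--                         [x for x in remaining if x != a and x != b],
--                     ))
--         states = new_states
--     return [indices for indices, _ in states]
-- ===== Notes on version B (the rewrite author's own statement) =====
-- stated objective: alternative
-- what changed: Replaces A's two-phase design (recursive depth-first enumeration of ordered pair-permutations by index slicing, then a second pass mapping each permutation to flux indices) with a single iterative breadth-first level expansion over partial-pairing states that removes paired dimensions by value and emits flux channel indices directly, never materialising the permutations.
import Mathlib
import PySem

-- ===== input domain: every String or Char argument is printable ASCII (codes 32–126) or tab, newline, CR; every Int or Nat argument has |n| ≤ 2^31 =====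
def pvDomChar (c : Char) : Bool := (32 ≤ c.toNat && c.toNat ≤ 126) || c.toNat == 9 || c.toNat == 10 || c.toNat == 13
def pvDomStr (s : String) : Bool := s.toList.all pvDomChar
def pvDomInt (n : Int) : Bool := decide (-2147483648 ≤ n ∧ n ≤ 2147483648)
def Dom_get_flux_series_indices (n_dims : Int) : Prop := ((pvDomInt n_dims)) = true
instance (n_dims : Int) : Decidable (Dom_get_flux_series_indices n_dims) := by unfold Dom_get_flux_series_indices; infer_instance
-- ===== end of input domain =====

-- B replaces A's two-phase recursive enumeration (depth-first pair-permutations by index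
-- slicing, then a second pass mapping permutations to flux indices) with one iterative
-- breadth-first expansion of partial-pairing states that emits flux indices directly
-- (objective: alternative decomposition, same output-dominated cost).

-- ===== PORT A =====
def getTupleIndex (a b n : Int) : Int :=
  -- assert a != b never fails on the calls A makes (the two elements are distinct)
  let minid := min a b
  let maxid := max a b
  PySem.Int.floordiv ((2 * n - minid - 1) * minid) 2 + maxid - minid - 1

-- get_ordered_perms; fuel only makes the recursion on the strictly shorter `remaining`
-- structurally terminating (fuel = len(series)+1 at the call site is always enough).
-- The `assert len(series) % 2 == 0` raise is excluded by Pre_ (odd positive n_dims).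
def gopA (fuel : Nat) (series : List Int) : List (List Int) :=
  match fuel with
  | 0 => []
  | fuel + 1 =>
    if PySem.List.len series = 2 then
      [[(PySem.List.min? series (fun y => y)).getD 0, (PySem.List.max? series (fun y => y)).getD 0]]
    else
      (PySem.List.pyRange 0 (PySem.List.len series - 1) 1).foldl (fun perms i =>
        (PySem.List.pyRange (i + 1) (PySem.List.len series) 1).foldl (fun perms j =>
          let si := PySem.List.pyGetD series i 0
          let sj := PySem.List.pyGetD series j 0
          let current := [min si sj, max si sj]
          let remaining := PySem.List.slice series none (some i) ++
            PySem.List.slice series (some (i + 1)) (some j) ++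
            PySem.List.slice series (some (j + 1)) none
          (gopA fuel remaining).foldl (fun perms perm => perms ++ [current ++ perm]) perms) perms) []

-- get_perm_index (indices perm[2i], perm[2i+1] are always in range on A's calls)
def permIndexA (n : Int) (perm : List Int) : List Int :=
  (PySem.List.pyRange 0 (PySem.Int.floordiv (PySem.List.len perm) 2) 1).foldl
    (fun acc i => acc ++ [getTupleIndex (PySem.List.pyGetD perm (2 * i) 0)
      (PySem.List.pyGetD perm (2 * i + 1) 0) n]) []

def get_flux_series_indices (n_dims : Int) : List (List Int) :=
  let series := PySem.List.pyRange 0 n_dims 1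
  let perms := gopA (series.length + 1) series
  perms.foldl (fun acc perm => acc ++ [permIndexA n_dims perm]) []

-- ===== PORT B =====
def pairIndexB (a b n : Int) : Int :=
  PySem.Int.floordiv ((2 * n - a - 1) * a) 2 + b - a - 1

def bRound (n : Int) (states : List (List Int × List Int)) : List (List Int × List Int) :=
  states.foldl (fun ns st =>
    (PySem.List.enumerate st.2 0).foldl (fun ns ka =>
      (PySem.List.slice st.2 (some (ka.1 + 1)) none).foldl (fun ns b =>
        ns ++ [(st.1 ++ [pairIndexB ka.2 b n],
                st.2.filter (fun x => x != ka.2 && x != b))]) ns) ns) []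

def get_flux_series_indices_alt (n_dims : Int) : List (List Int) :=
  if n_dims ≤ 0 then []
  else
    let states := (PySem.List.pyRange 0 (PySem.Int.floordiv n_dims 2) 1).foldl
      (fun sts _ => bRound n_dims sts) [(([] : List Int), PySem.List.pyRange 0 n_dims 1)]
    states.map Prod.fst

-- ===== PRECONDITION & SPEC =====
-- Pre_ excludes exactly the odd positive n_dims, on which A raises AssertionError
-- (`assert len(series) % 2 == 0`); A returns normally on every other int.
def Pre_get_flux_series_indices (n_dims : Int) : Prop :=
  n_dims ≤ 0 ∨ PySem.Int.mod n_dims 2 = 0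
instance (n_dims : Int) : Decidable (Pre_get_flux_series_indices n_dims) := by
  unfold Pre_get_flux_series_indices; infer_instance
def pvWitness_get_flux_series_indices : Int := 4

def Spec_get_flux_series_indices (n_dims : Int) (out : List (List Int)) : Prop := out = get_flux_series_indices_alt n_dims
instance (n_dims : Int) (out : List (List Int)) : Decidable (Spec_get_flux_series_indices n_dims out) := by unfold Spec_get_flux_series_indices; infer_instance

-- ===== CLAIM (what is proved, stated in full; the proofs are below) =====
def Claim_equal_get_flux_series_indices : Prop := ∀ (n_dims : Int), Dom_get_flux_series_indices n_dims → Pre_get_flux_series_indices n_dims → Spec_get_flux_series_indices n_dims (get_flux_series_indices n_dims)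

-- ===== LEMMAS AND PROOFS =====
-- Proof-side vocabulary: ordered pairs of a list, selections with rest, removal by value,
-- and the common specification specF both ports are reduced to.
def rmv (a b : Int) (l : List Int) : List Int := l.filter (fun x => x != a && x != b)

theorem length_rmv {l : List Int} (hnd : l.Nodup) {a b : Int}
    (ha : a ∈ l) (hb : b ∈ l) (hne : a ≠ b) : (rmv a b l).length + 2 = l.length := by
  have h1 : rmv a b l = (l.erase a).erase b := by
    rw [rmv, hnd.erase_eq_filter, (hnd.filter _).erase_eq_filter, List.filter_filter]
    congr 1
    funext x
    by_cases hx : x = a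
    · subst hx; simp
    · by_cases hy : x = b <;> simp [bne, hy, Bool.and_comm]
  have hb' : b ∈ l.erase a := (List.mem_erase_of_ne hne.symm).mpr hb
  have h2 := List.length_pos_of_mem hb'
  have h3 := List.length_pos_of_mem ha
  have h4 : (l.erase a).length = l.length - 1 := List.length_erase_of_mem ha
  rw [h1, List.length_erase_of_mem hb', List.length_erase_of_mem ha]
  omega

def sel1 : List Int → List (Int × List Int)
  | [] => []
  | y :: ys => (y, ys) :: (sel1 ys).map (fun zr => (zr.1, y :: zr.2))

theorem sel1_eq_map (xs : List Int) :
    sel1 xs = (List.range xs.length).map (fun k => (xs.getD k 0, xs.take k ++ xs.drop (k + 1))) := by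
  induction xs with
  | nil => rfl
  | cons y ys ih =>
    simp only [sel1, List.length_cons, List.range_succ_eq_map, List.map_cons, List.map_map, ih]
    simp [Function.comp]

theorem permIndexA_map (n : Int) (perm : List Int) :
    permIndexA n perm = (List.range (perm.length / 2)).map (fun k =>
      getTupleIndex (perm.getD (2 * k) 0) (perm.getD (2 * k + 1) 0) n) := by
  rw [permIndexA, PySem.List.foldl_append_singleton_eq_map]
  have h1 : PySem.Int.floordiv (PySem.List.len perm) 2 = ((perm.length / 2 : Nat) : Int) := by
    rw [PySem.List.len_eq]
    exact_mod_cast PySem.Int.floordiv_natCast perm.length 2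
  rw [h1, PySem.List.pyRange_one]
  simp only [sub_zero, Int.toNat_natCast, List.map_map]
  refine (List.nil_append _).trans (List.map_congr_left ?_)
  intro k _
  simp only [Function.comp_apply, zero_add]
  have e1 : 2 * ((k:Int)) = ((2*k : Nat) : Int) := by push_cast; ring
  have e2 : 2 * ((k:Int)) + 1 = ((2*k+1 : Nat) : Int) := by push_cast; ring
  rw [e1]
  have e2' : ((2*k : Nat) : Int) + 1 = ((2*k+1 : Nat) : Int) := by push_cast; ring
  rw [e2', PySem.List.pyGetD_natCast, PySem.List.pyGetD_natCast]

theorem permIndexA_cons (n a b : Int) (r : List Int) :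
    permIndexA n (a :: b :: r) = getTupleIndex a b n :: permIndexA n r := by
  rw [permIndexA_map, permIndexA_map]
  have h1 : (a :: b :: r).length / 2 = r.length / 2 + 1 := by
    simp [List.length_cons]; omega
  rw [h1, List.range_succ_eq_map]
  simp [List.map_map, Function.comp, Nat.mul_succ]

def pairs : List Int → List (Int × Int)
  | [] => []
  | x :: xs => xs.map (fun y => (x, y)) ++ pairs xs

def pairsR : List Int → List (Int × Int × List Int)
  | [] => []
  | x :: xs => (sel1 xs).map (fun yr => (x, yr.1, yr.2)) ++
      (pairsR xs).map (fun t => (t.1, t.2.1, x :: t.2.2))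

theorem loopsA_nat {β : Type} : ∀ (l : List Int) (G : Int → Int → List Int → List β),
    (List.range (l.length - 1)).flatMap (fun i =>
      (List.range (l.length - 1 - i)).flatMap (fun d =>
        G (l.getD i 0) (l.getD (i + 1 + d) 0)
          (l.take i ++ ((l.drop (i + 1)).take d) ++ l.drop (i + 1 + d + 1))))
    = (pairsR l).flatMap (fun t => G t.1 t.2.1 t.2.2) := by
  intro l
  induction l with
  | nil => intro G; simp [pairsR]
  | cons x xs ih =>
    intro G
    rcases xs with _ | ⟨y, ys⟩
    · simp [pairsR, sel1]
    · set xs := y :: ys with hxs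
      have hlen : (x :: xs).length - 1 = (xs.length - 1) + 1 := by
        simp [hxs]
      rw [hlen, List.range_succ_eq_map, List.flatMap_cons, List.flatMap_map]
      have row0 : (List.range (xs.length - 1 + 1 - 0)).flatMap (fun d =>
          G ((x :: xs).getD 0 0) ((x :: xs).getD (0 + 1 + d) 0)
            ((x :: xs).take 0 ++ (((x :: xs).drop (0 + 1)).take d) ++ (x :: xs).drop (0 + 1 + d + 1)))
          = (sel1 xs).flatMap (fun yr => G x yr.1 yr.2) := by
        rw [sel1_eq_map, List.flatMap_map]
        have hr : xs.length - 1 + 1 - 0 = xs.length := by simp [hxs]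
        rw [hr]
        congr 1
        funext d
        simp only [List.getD_cons_zero, List.take_zero, List.nil_append]
        simp [Nat.add_comm, Nat.add_left_comm]
      have rows : (List.range (xs.length - 1)).flatMap (fun i =>
          (List.range (xs.length - 1 + 1 - (i + 1))).flatMap (fun d =>
            G ((x :: xs).getD (i + 1) 0) ((x :: xs).getD (i + 1 + 1 + d) 0)
              ((x :: xs).take (i + 1) ++ (((x :: xs).drop (i + 1 + 1)).take d) ++ (x :: xs).drop (i + 1 + 1 + d + 1))))
          = (pairsR xs).flatMap (fun t => G t.1 t.2.1 (x :: t.2.2)) := by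
        rw [← ih (fun a b rest => G a b (x :: rest))]
        congr 1
        funext i
        have e0 : xs.length - 1 + 1 - (i + 1) = xs.length - 1 - i := by omega
        rw [e0]
        congr 1
        funext d
        have e1 : i + 1 + 1 + d = (i + 1 + d) + 1 := by omega
        rw [e1]
        have e2 : (i + 1 + d) + 1 + 1 = (i + 1 + d + 1) + 1 := by omega
        rw [e2]
        simp [List.take_succ_cons, List.drop_succ_cons, List.cons_append, List.append_assoc]
      rw [row0, pairsR]
      simp only [Nat.succ_eq_add_one]
      rw [rows]
      simp [List.flatMap_append, List.flatMap_map]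

theorem sel1_eq_filter : ∀ (xs : List Int), xs.Nodup →
    sel1 xs = xs.map (fun y => (y, xs.filter (fun z => z != y))) := by
  intro xs
  induction xs with
  | nil => intro _; rfl
  | cons y ys ih =>
    intro hnd
    rcases List.nodup_cons.mp hnd with ⟨hy, hys⟩
    simp only [sel1, ih hys, List.map_map, List.map_cons, List.filter_cons]
    congr 1
    · have h0 : List.filter (fun z => z != y) ys = ys :=
        List.filter_eq_self.mpr (fun a ha => bne_iff_ne.mpr (fun h => hy (h ▸ ha)))
      simp [h0]
    · apply List.map_congr_left
      intro z hz
      have hzy : y ≠ z := fun h => hy (h ▸ hz)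
      simp [Function.comp, bne_iff_ne.mpr hzy]

theorem mem_pairs' {l : List Int} {p : Int × Int} (h : p ∈ pairs l) : p.1 ∈ l ∧ p.2 ∈ l := by
  induction l with
  | nil => simp [pairs] at h
  | cons x xs ih =>
    simp only [pairs, List.mem_append, List.mem_map] at h
    rcases h with ⟨y, hy, rfl⟩ | h
    · simp [hy]
    · rcases ih h with ⟨h1, h2⟩; simp [h1, h2]

theorem pairsR_eq_pairs : ∀ {l : List Int}, l.Pairwise (· < ·) →
    pairsR l = (pairs l).map (fun p => (p.1, p.2, rmv p.1 p.2 l)) := by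
  intro l
  induction l with
  | nil => intro _; rfl
  | cons x xs ih =>
    intro hs
    rcases List.pairwise_cons.mp hs with ⟨hx, hxs⟩
    have hnd : xs.Nodup := hxs.nodup
    simp only [pairsR, pairs, List.map_append, List.map_map, ih hxs]
    congr 1
    · rw [sel1_eq_filter xs hnd, List.map_map]
      apply List.map_congr_left
      intro y hy
      have hxy : x < y := hx y hy
      simp only [Function.comp_apply, rmv, List.filter_cons]
      have : (x != x && x != y) = false := by simp
      rw [this]
      simp only [Bool.false_eq_true, if_false, Prod.mk.injEq, true_and]
      refine List.filter_congr ?_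
      intro z hz
      have hzx : z ≠ x := fun h => absurd (hx z hz) (by simp [h])
      simp [bne_iff_ne.mpr hzx]
    · apply List.map_congr_left
      intro p hp
      rcases mem_pairs' hp with ⟨h1, h2⟩
      simp only [rmv, List.filter_cons]
      have e1 : (x != p.1 && x != p.2) = true := by
        simp [bne_iff_ne.mpr (ne_of_lt (hx _ h1)), bne_iff_ne.mpr (ne_of_lt (hx _ h2))]
      simp [e1]

theorem gopA_else (f : Nat) (l : List Int) (h1 : 1 ≤ l.length) (h2 : l.length ≠ 2) :
    gopA (f + 1) l = (List.range (l.length - 1)).flatMap (fun i =>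
      (List.range (l.length - 1 - i)).flatMap (fun d =>
        (gopA f (l.take i ++ ((l.drop (i + 1)).take d) ++ l.drop (i + 1 + d + 1))).map
          (fun perm => [min (l.getD i 0) (l.getD (i + 1 + d) 0),
                        max (l.getD i 0) (l.getD (i + 1 + d) 0)] ++ perm))) := by
  rw [gopA]
  rw [if_neg (by simp [PySem.List.len_eq]; omega)]
  simp only [PySem.List.foldl_append_singleton_eq_map, PySem.List.foldl_append_eq_flatMap,
    List.nil_append]
  have hc : PySem.List.len l - 1 = ((l.length - 1 : Nat) : Int) := by
    simp [PySem.List.len_eq]; omega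
  rw [hc, PySem.List.pyRange_one]
  simp only [sub_zero, Int.toNat_natCast, List.flatMap_map]
  congr 1
  funext k
  simp only [zero_add]
  have hr : PySem.List.pyRange ((k : Int) + 1) (PySem.List.len l) 1
      = (List.range (l.length - 1 - k)).map (fun d : Nat => ((k : Int) + 1 + (d : Int))) := by
    rw [PySem.List.pyRange_one]
    have ht : (PySem.List.len l - ((k : Int) + 1)).toNat = l.length - 1 - k := by
      simp only [PySem.List.len_eq]; omega
    rw [ht]
  rw [hr, List.flatMap_map]
  congr 1
  funext d
  have c1 : (k : Int) + 1 = ((k + 1 : Nat) : Int) := by push_cast; ring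
  have c2 : (k : Int) + 1 + (d : Int) = ((k + 1 + d : Nat) : Int) := by push_cast; ring
  have c3 : (k : Int) + 1 + (d : Int) + 1 = ((k + 1 + d + 1 : Nat) : Int) := by push_cast; ring
  rw [c3, PySem.List.slice_from_natCast]
  rw [c2, PySem.List.pyGetD_natCast]
  have hsl : PySem.List.slice l (some ((k:Int) + 1)) (some (((k + 1 + d : Nat) : Int)))
      = (l.drop (k+1)).take d := by
    rw [c1, PySem.List.slice_natCast]
    congr 1
    omega
  rw [hsl, PySem.List.slice_to_natCast, PySem.List.pyGetD_natCast]

def specF (n : Int) : Nat → List Int → List (List Int)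
  | 0, _ => [[]]
  | m + 1, l => (pairs l).flatMap (fun p =>
      (specF n m (rmv p.1 p.2 l)).map (fun t => pairIndexB p.1 p.2 n :: t))

theorem permIndexA_nil (n : Int) : permIndexA n [] = [] := by
  simp [permIndexA, PySem.List.len, PySem.List.pyRange]

theorem tup_eq {a b : Int} (n : Int) (h : a < b) : getTupleIndex a b n = pairIndexB a b n := by
  simp [getTupleIndex, pairIndexB, min_eq_left h.le, max_eq_right h.le]

theorem pairs_lt {l : List Int} (hs : l.Pairwise (· < ·)) {p : Int × Int}
    (h : p ∈ pairs l) : p.1 < p.2 := by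
  induction l with
  | nil => simp [pairs] at h
  | cons x xs ih =>
    simp only [pairs, List.mem_append, List.mem_map] at h
    rcases List.pairwise_cons.mp hs with ⟨hx, hxs⟩
    rcases h with ⟨y, hy, rfl⟩ | h
    · exact hx y hy
    · exact ih hxs h

theorem A_eq (n : Int) : ∀ (m fuel : Nat) (l : List Int), l.Pairwise (· < ·) →
    l.length = 2 * (m + 1) → m + 1 ≤ fuel →
    (gopA fuel l).map (permIndexA n) = specF n (m + 1) l := by
  intro m
  induction m with
  | zero =>
    intro fuel l hs hl hf
    rcases l with _ | ⟨a, _ | ⟨b, _ | _⟩⟩ <;> simp at hl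
    rcases fuel with _ | f
    · omega
    have hab : a < b := (List.pairwise_cons.mp hs).1 b (by simp)
    rw [gopA]
    rw [if_pos (by simp [PySem.List.len_eq])]
    rw [PySem.List.min?_id_cons, PySem.List.max?_id_cons]
    simp only [List.foldl, Option.getD_some]
    rw [min_eq_left hab.le, max_eq_right hab.le]
    rw [List.map_singleton, permIndexA_cons, permIndexA_nil]
    simp [specF, pairs, tup_eq n hab]
  | succ m ih =>
    intro fuel l hs hl hf
    rcases fuel with _ | f
    · omega
    rw [gopA_else f l (by omega) (by omega)]
    simp only [List.map_flatMap, List.map_map]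
    rw [loopsA_nat l (fun a b rest =>
      (gopA f rest).map (permIndexA n ∘ (fun perm => [min a b, max a b] ++ perm)))]
    rw [pairsR_eq_pairs hs, List.flatMap_map]
    show _ = specF n (m + 1 + 1) l
    rw [specF]
    apply List.flatMap_congr
    intro p hp
    have hlt : p.1 < p.2 := pairs_lt hs hp
    have hmem := mem_pairs' hp
    have hsub : (rmv p.1 p.2 l).Sublist l := List.filter_sublist
    have hsR : (rmv p.1 p.2 l).Pairwise (· < ·) := hs.sublist hsub
    have hlR : (rmv p.1 p.2 l).length = 2 * (m + 1) := by
      have := length_rmv hs.nodup hmem.1 hmem.2 (ne_of_lt hlt)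
      omega
    rw [min_eq_left hlt.le, max_eq_right hlt.le]
    rw [← ih f (rmv p.1 p.2 l) hsR hlR (by omega)]
    rw [List.map_map]
    apply List.map_congr_left
    intro perm _
    simp only [Function.comp_apply, List.cons_append, List.nil_append]
    rw [permIndexA_cons, tup_eq n hlt]

theorem pairs_enum {γ : Type} (H : Int → Int → γ) : ∀ (l pre : List Int),
    (PySem.List.enumerate l (pre.length : Int)).flatMap (fun ka =>
      (PySem.List.slice (pre ++ l) (some (ka.1 + 1)) none).map (fun b => H ka.2 b))
    = (pairs l).map (fun p => H p.1 p.2) := by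
  intro l
  induction l with
  | nil => intro pre; simp [pairs, PySem.List.enumerate]
  | cons x xs ih =>
    intro pre
    rw [PySem.List.enumerate_cons, List.flatMap_cons]
    have c1 : (pre.length : Int) + 1 = (((pre ++ [x]).length : Nat) : Int) := by
      simp
    have hfirst : PySem.List.slice (pre ++ x :: xs) (some ((pre.length : Int) + 1)) none = xs := by
      rw [c1, PySem.List.slice_from_natCast]
      rw [show pre ++ x :: xs = (pre ++ [x]) ++ xs by simp]
      exact List.drop_left' rfl
    rw [hfirst]
    have hrest : pre ++ x :: xs = (pre ++ [x]) ++ xs := by simp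
    rw [hrest, c1, ih (pre ++ [x])]
    simp [pairs, List.map_append, List.map_map, Function.comp]

theorem bRound_eq (n : Int) (states : List (List Int × List Int)) :
    bRound n states = states.flatMap (fun st => (pairs st.2).map (fun p =>
      (st.1 ++ [pairIndexB p.1 p.2 n], rmv p.1 p.2 st.2))) := by
  rw [bRound]
  simp only [PySem.List.foldl_append_singleton_eq_map, PySem.List.foldl_append_eq_flatMap]
  rw [List.nil_append]
  apply List.flatMap_congr
  intro st _
  have h := pairs_enum (fun a b => (st.1 ++ [pairIndexB a b n], rmv a b st.2)) st.2 []
  simpa [rmv] using h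

theorem foldl_iter {α β : Type} (f : α → α) (l : List β) (s : α) :
    l.foldl (fun s _ => f s) s = f^[l.length] s := by
  induction l generalizing s with
  | nil => rfl
  | cons x xs ih => simp [List.foldl_cons, ih, Function.iterate_succ_apply]

theorem B_main (n : Int) : ∀ (m : Nat) (states : List (List Int × List Int)),
    (∀ st ∈ states, st.2.Pairwise (· < ·) ∧ st.2.length = 2 * m) →
    ((bRound n)^[m] states).map Prod.fst
      = states.flatMap (fun st => (specF n m st.2).map (fun t => st.1 ++ t)) := by
  intro m
  induction m with
  | zero =>
    intro states hst
    simp only [Function.iterate_zero, id_eq, specF]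
    simp only [List.map_cons, List.map_nil, List.append_nil]
    induction states with
    | nil => rfl
    | cons s ss ihs => simp_all [List.flatMap_cons]
  | succ m ih =>
    intro states hst
    rw [Function.iterate_succ_apply, ih (bRound n states) ?inv]
    case inv =>
      intro st' hst'
      rw [bRound_eq] at hst'
      rcases List.mem_flatMap.mp hst' with ⟨st, hstm, hmem⟩
      rcases List.mem_map.mp hmem with ⟨p, hp, rfl⟩
      rcases hst st hstm with ⟨hsort, hlen⟩
      have hlt := pairs_lt hsort hp
      have hmem2 := mem_pairs' hp
      refine ⟨hsort.sublist List.filter_sublist, ?_⟩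
      have := length_rmv hsort.nodup hmem2.1 hmem2.2 (ne_of_lt hlt)
      simp only at this ⊢
      omega
    rw [bRound_eq, List.flatMap_assoc]
    show _ = states.flatMap (fun st => (specF n (m+1) st.2).map (fun t => st.1 ++ t))
    apply List.flatMap_congr
    intro st _
    rw [specF, List.flatMap_map]
    simp only [List.map_flatMap, List.map_map]
    apply List.flatMap_congr
    intro p hp
    apply List.map_congr_left
    intro t _
    simp [Function.comp, List.append_assoc]

-- ===== VERDICT (by name: the statement is the Claim_ definition above) =====
theorem get_flux_series_indices_spec : Claim_equal_get_flux_series_indices := by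
  intro n _ hpre
  unfold Pre_get_flux_series_indices at hpre
  unfold Spec_get_flux_series_indices
  by_cases hn : n ≤ 0
  · have hseries : PySem.List.pyRange 0 n 1 = [] := PySem.List.pyRange_one_eq_nil hn
    rw [get_flux_series_indices_alt, if_pos hn, get_flux_series_indices]
    simp only [hseries]
    rw [gopA]
    norm_num [PySem.List.len, PySem.List.pyRange]
  · replace hn : 0 < n := by omega
    have hmod : PySem.Int.mod n 2 = 0 := by
      rcases hpre with h | h
      · omega
      · exact h
    have hdvd : (2 : Int) ∣ n := (PySem.Int.mod_eq_zero_iff_dvd n 2).mp hmod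
    obtain ⟨k, hk⟩ := hdvd
    have hk1 : 1 ≤ k := by omega
    obtain ⟨M', hM'⟩ : ∃ M' : Nat, k = (M' : Int) + 1 := ⟨(k - 1).toNat, by omega⟩
    set M : Nat := M' + 1 with hM
    have hkM : k = (M : Int) := by push_cast [hM]; omega
    set series := PySem.List.pyRange 0 n 1 with hser
    have hlen : series.length = 2 * M := by
      rw [hser, PySem.List.length_pyRange_one]
      omega
    have hsort : series.Pairwise (· < ·) := PySem.List.pairwise_lt_pyRange_one ..
    -- A side
    rw [get_flux_series_indices]
    rw [PySem.List.foldl_append_singleton_eq_map, List.nil_append]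
    rw [A_eq n M' (series.length + 1) series hsort (by omega) (by omega)]
    -- B side
    rw [get_flux_series_indices_alt, if_neg (by omega)]
    have hfd : PySem.Int.floordiv n 2 = (M : Int) := by
      have : n = (((2 * M : Nat) : Nat) : Int) := by push_cast; omega
      rw [this]
      rw [show (2 : Int) = ((2 : Nat) : Int) from rfl]
      rw [PySem.Int.floordiv_natCast]
      congr 1
      omega
    rw [hfd, foldl_iter, PySem.List.length_pyRange_one]
    have hit : ((M : Int) - 0).toNat = M := by omega
    rw [hit]
    rw [B_main n M [(([] : List Int), series)] (by intro st hst; simp at hst; subst hst; exact ⟨hsort, hlen⟩)]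
    simp [hM]
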